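-- pv_equiv track=rewrite | github.com/Wayne-Z/Algorithm-greatest-hits | graph algorithms/Johnson's APSP/Johnson's.py | adj_listify_target
-- ===== SOURCE A (Python) =====
-- from operator import itemgetter
--
-- def adj_listify_target(g):
--         '''
--         Returns the adjacency list representation of a directed graph G from a naive
--         list of the form [tail, head, edge_cost]
--         where the first element of each sublist is the head of an edge
--         '''
--         graph = []
--         sol = []
--         g = sorted(g, key=itemgetter(1))
--         curr = g[0][1]
--         sol.append([curr])
--
--         for idx, row in enumerate(g):
--             if curr == row[1]:
--                 sol.append([row[0], row[2]])
--             else: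
--                 graph.append(sol)
--                 sol = []
--                 curr = row[1]
--                 sol.append([curr])
--                 sol.append([row[0], row[2]])
--
--         # final remaining sublist
--         graph.append(sol)
--         return graph
-- ===== SOURCE B (Python) =====
-- def adj_listify_target(g):
--     '''
--     Adjacency-list representation of a directed graph given as
--     [tail, head, edge_cost] triples: bucket the edges by head in one
--     linear pass over g, then emit the buckets by ascending head.
--     '''
--     buckets = {}
--     for row in g:
--         buckets.setdefault(row[1], []).append([row[0], row[2]])
--     return [[[h]] + buckets[h] for h in sorted(buckets)]
-- ===== Notes on version B (the rewrite author's own statement) =====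
-- stated objective: idiomatic
-- what changed: Replaces A's sort of all edges followed by a running-'curr' grouping scan with dict bucketing in one pass over g (insertion order preserves A's stable within-head order) and a sort of only the distinct heads.
import Mathlib
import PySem

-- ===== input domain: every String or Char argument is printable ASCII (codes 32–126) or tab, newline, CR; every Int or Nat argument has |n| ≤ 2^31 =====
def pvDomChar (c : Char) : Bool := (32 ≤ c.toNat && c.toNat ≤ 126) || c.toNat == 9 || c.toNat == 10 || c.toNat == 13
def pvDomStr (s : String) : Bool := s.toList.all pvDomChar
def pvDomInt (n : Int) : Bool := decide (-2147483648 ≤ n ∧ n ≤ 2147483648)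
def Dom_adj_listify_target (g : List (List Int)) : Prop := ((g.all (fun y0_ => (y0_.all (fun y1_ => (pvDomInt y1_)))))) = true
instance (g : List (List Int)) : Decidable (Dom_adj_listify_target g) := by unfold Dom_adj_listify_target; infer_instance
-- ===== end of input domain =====

-- B buckets the [tail, cost] pairs by head in one pass and sorts only the distinct
-- heads, instead of A's sort of all edges followed by a running-'curr' grouping scan.

-- ===== PORT A =====
def adj_listify_target (g : List (List Int)) : List (List (List Int)) :=
  -- g = sorted(g, key=itemgetter(1))
  let g' := PySem.List.sorted g (fun row => PySem.List.pyGetD row 1 0) false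
  -- curr = g[0][1]  (in range under Pre_)
  let curr := PySem.List.pyGetD (PySem.List.pyGetD g' 0 []) 1 0
  -- for idx, row in enumerate(g): …  (state = (graph, sol, curr))
  let st := (PySem.List.enumerate g' 0).foldl
    (fun (st : List (List (List Int)) × List (List Int) × Int) ir =>
      if st.2.2 == PySem.List.pyGetD ir.2 1 0 then
        (st.1, st.2.1 ++ [[PySem.List.pyGetD ir.2 0 0, PySem.List.pyGetD ir.2 2 0]], st.2.2)
      else
        (st.1 ++ [st.2.1],
         [[PySem.List.pyGetD ir.2 1 0], [PySem.List.pyGetD ir.2 0 0, PySem.List.pyGetD ir.2 2 0]],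
         PySem.List.pyGetD ir.2 1 0))
    ([], [[curr]], curr)
  -- graph.append(sol); return graph
  st.1 ++ [st.2.1]

-- ===== PORT B =====
def adj_listify_target_alt (g : List (List Int)) : List (List (List Int)) :=
  -- buckets.setdefault(row[1], []).append([row[0], row[2]])
  let buckets := g.foldl
    (fun (d : PySem.Dict Int (List (List Int))) row =>
      d.modify (PySem.List.pyGetD row 1 0) []
        (fun x => x ++ [[PySem.List.pyGetD row 0 0, PySem.List.pyGetD row 2 0]]))
    PySem.Dict.empty
  -- [[[h]] + buckets[h] for h in sorted(buckets)]
  (PySem.List.sorted buckets.keys (fun h => h) false).map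
    (fun h => [h] :: buckets.getD h [])

-- ===== PRECONDITION & SPEC =====
-- Pre_ excludes exactly the inputs on which the Python A raises IndexError: the empty
-- list (A reads g[0]) and any row of fewer than 3 elements (A reads row[1] and row[2]).
def Pre_adj_listify_target (g : List (List Int)) : Prop :=
  g ≠ [] ∧ ∀ r ∈ g, 3 ≤ r.length
instance (g : List (List Int)) : Decidable (Pre_adj_listify_target g) := by
  unfold Pre_adj_listify_target; infer_instance

def pvWitness_adj_listify_target : List (List Int) := [[1, 2, 3], [4, 2, 5], [0, 1, 7]]

def Spec_adj_listify_target (g : List (List Int)) (out : List (List (List Int))) : Prop :=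
  out = adj_listify_target_alt g
instance (g : List (List Int)) (out : List (List (List Int))) : Decidable (Spec_adj_listify_target g out) := by
  unfold Spec_adj_listify_target; infer_instance

-- ===== CLAIM (what is proved, stated in full; the proofs are below) =====
def Claim_equal_adj_listify_target : Prop := ∀ (g : List (List Int)), Dom_adj_listify_target g → Pre_adj_listify_target g → Spec_adj_listify_target g (adj_listify_target g)

-- ===== LEMMAS AND PROOFS =====

-- key (row[1]) and emitted pair ([row[0], row[2]]) of an edge row
def kf (r : List Int) : Int := PySem.List.pyGetD r 1 0
def ef (r : List Int) : List Int :=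
  [PySem.List.pyGetD r 0 0, PySem.List.pyGetD r 2 0]

-- one output group per head, edges taken from l in order
def Fm (l : List (List Int)) (h : Int) : List (List Int) :=
  [h] :: (l.filter (fun r => kf r == h)).map ef

-- A's loop body on state (graph, sol, curr)
def stepA (st : List (List (List Int)) × List (List Int) × Int) (row : List Int) :
    List (List (List Int)) × List (List Int) × Int :=
  if st.2.2 == kf row then (st.1, st.2.1 ++ [ef row], st.2.2)
  else (st.1 ++ [st.2.1], [[kf row], ef row], kf row)

-- A's grouping loop as a structural recursion
def runsA (c : Int) (S : List (List Int)) : List (List Int) → List (List (List Int))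
  | [] => [S]
  | r :: t =>
      if c == kf r then runsA c (S ++ [ef r]) t
      else S :: runsA (kf r) [[kf r], ef r] t

theorem foldl_enum_snd {α σ : Type} (l : List α) (s : Int) (F : σ → α → σ) (init : σ) :
    (PySem.List.enumerate l s).foldl (fun st ir => F st ir.2) init = l.foldl F init := by
  induction l generalizing s init with
  | nil => simp [PySem.List.enumerate_nil]
  | cons x xs ih => simp [PySem.List.enumerate_cons, ih]

theorem foldA_runs (l : List (List Int)) :
    ∀ (G : List (List (List Int))) (S : List (List Int)) (c : Int),
      (l.foldl stepA (G, S, c)).1 ++ [(l.foldl stepA (G, S, c)).2.1] = G ++ runsA c S l := by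
  induction l with
  | nil => intro G S c; simp [runsA]
  | cons r t ih =>
    intro G S c
    simp only [List.foldl_cons, stepA, runsA]
    cases hcb : (c == kf r) with
    | true => simp [ih]
    | false => simp [ih]

theorem dedup_cons {x : Int} {xs : List Int} :
    PySem.List.dedup (x :: xs) = x :: (PySem.List.dedup xs).filter (fun y => !(y == x)) := by
  show PySem.Set.ofList (x :: xs) = _
  rw [PySem.Set.ofList_eq_foldl]
  simp only [List.foldl_cons]
  have h1 : PySem.Set.add [] x = [x] := by rw [PySem.Set.add_eq_ite]; simp
  rw [h1]
  rw [show xs.foldl PySem.Set.add [x] = PySem.Set.update [x] xs from rfl,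
      PySem.Set.update_eq_append_filter]
  simp only [PySem.List.dedup, List.cons_append, List.nil_append]
  congr 1
  apply List.filter_congr
  intro y _
  simp only [PySem.Set.contains]
  exact Bool.eq_iff_iff.mpr (by simp)

theorem dedup_sublist (xs : List Int) : (PySem.List.dedup xs).Sublist xs := by
  induction xs with
  | nil => exact List.Sublist.refl _
  | cons x t ih =>
    rw [dedup_cons]
    exact List.Sublist.cons₂ x (List.filter_sublist.trans ih)

theorem insertBy_filter (h : Int) (x : List Int) (ys : List (List Int))
    (hp : (ys.map kf).Pairwise (· ≤ ·)) :
    (PySem.List.insertBy (fun a b => decide (kf a < kf b)) x ys).filter (fun r => kf r == h)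
      = ys.filter (fun r => kf r == h) ++ if kf x == h then [x] else [] := by
  induction ys with
  | nil =>
    simp only [PySem.List.insertBy, List.filter_cons, List.filter_nil]
    by_cases hx : kf x = h <;> simp [hx]
  | cons y t ih =>
    obtain ⟨hy, hpt⟩ : (∀ a ∈ t, kf y ≤ kf a) ∧ (t.map kf).Pairwise (· ≤ ·) := by
      simpa using hp
    simp only [PySem.List.insertBy]
    by_cases hlt : kf x < kf y
    · rw [if_pos (by simp [hlt])]
      by_cases hx : kf x = h
      · have hall : ∀ r ∈ y :: t, ¬ ((kf r == h) = true) := by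
          intro r hr
          simp only [beq_iff_eq]
          rcases List.mem_cons.mp hr with rfl | hr'
          · omega
          · have := hy r hr'; omega
        rw [List.filter_cons_of_pos (by simp [hx]), List.filter_eq_nil_iff.mpr hall]
        simp [hx]
      · rw [List.filter_cons_of_neg (by simp [hx]), if_neg (by simp [hx])]
        simp
    · rw [if_neg (by simp [hlt])]
      by_cases hyh : kf y = h <;>
        simp [hyh, ih hpt]

theorem sorted_filter_stable (xs : List (List Int)) (h : Int) :
    (PySem.List.sorted xs kf false).filter (fun r => kf r == h)
      = xs.filter (fun r => kf r == h) := by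
  induction xs using List.reverseRecOn with
  | nil => simp [PySem.List.sorted]
  | append_singleton ys x ih =>
    rw [PySem.List.sorted_eq_foldl_insertBy, List.foldl_append, List.foldl_cons, List.foldl_nil,
        ← PySem.List.sorted_eq_foldl_insertBy,
        insertBy_filter h x _ (by simpa using PySem.List.sorted_map_key_pairwise ys kf),
        ih, List.filter_append]
    by_cases hx : kf x = h <;> simp [hx]

theorem runs_spec (l : List (List Int)) :
    ∀ (c : Int) (S : List (List Int)),
      ((l.map kf).Pairwise (· ≤ ·)) → (∀ r ∈ l, c ≤ kf r) →
      runsA c S l =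
        (S ++ (l.filter (fun r => kf r == c)).map ef)
          :: ((PySem.List.dedup (l.map kf)).filter (fun y => !(y == c))).map (Fm l) := by
  induction l with
  | nil =>
    intro c S _ _
    simp [runsA, PySem.List.dedup, PySem.Set.ofList]
  | cons r t ih =>
    intro c S hp hlb
    obtain ⟨hy, hpt⟩ : (∀ a ∈ t, kf r ≤ kf a) ∧ (t.map kf).Pairwise (· ≤ ·) := by
      simpa using hp
    simp only [runsA, List.map_cons]
    have e2 : (PySem.List.dedup (kf r :: t.map kf)).filter (fun y => !(y == kf r))
        = (PySem.List.dedup (t.map kf)).filter (fun y => !(y == kf r)) := by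
      rw [dedup_cons, List.filter_cons_of_neg (by simp), List.filter_filter]
      exact List.filter_congr (fun y _ => by simp)
    by_cases hc : c = kf r
    · subst hc
      rw [if_pos (by simp), ih (kf r) (S ++ [ef r]) hpt hy]
      congr 1
      · rw [List.filter_cons_of_pos (by simp), List.map_cons, List.append_assoc]
        rfl
      · rw [e2]
        apply List.map_congr_left
        intro y hy'
        have hne : ¬ (y = kf r) := by simpa using (List.mem_filter.mp hy').2
        unfold Fm
        rw [List.filter_cons_of_neg (by simp only [beq_iff_eq]; omega)]
    · have hcr : c < kf r := lt_of_le_of_ne (hlb r (List.mem_cons_self ..)) hc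
      rw [if_neg (by simp [hc]), ih (kf r) [[kf r], ef r] hpt hy]
      have hgt : ∀ a ∈ t.map kf, c < a := by
        intro a ha
        obtain ⟨x, hx, rfl⟩ := List.mem_map.mp ha
        exact lt_of_lt_of_le hcr (hy x hx)
      have hnil : (r :: t).filter (fun x => kf x == c) = [] := by
        apply List.filter_eq_nil_iff.mpr
        intro a ha
        simp only [beq_iff_eq]
        rcases List.mem_cons.mp ha with rfl | ha'
        · omega
        · have := hgt (kf a) (List.mem_map_of_mem ha'); omega
      have e1 : (PySem.List.dedup (kf r :: t.map kf)).filter (fun y => !(y == c))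
          = kf r :: (PySem.List.dedup (t.map kf)).filter (fun y => !(y == kf r)) := by
        have hne : kf r ≠ c := by omega
        rw [dedup_cons, List.filter_cons_of_pos (by simp [hne])]
        congr 1
        apply List.filter_eq_self.mpr
        intro a ha
        have hac := hgt a ((PySem.List.mem_dedup ..).mp (List.mem_filter.mp ha).1)
        have hane : a ≠ c := by omega
        simp [hane]
      rw [hnil, e1, List.map_cons]
      simp only [List.map_nil, List.append_nil]
      congr 1
      congr 1
      · unfold Fm
        rw [List.filter_cons_of_pos (by simp)]
        simp
      · apply List.map_congr_left
        intro y hy'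
        have hne : ¬ (y = kf r) := by simpa using (List.mem_filter.mp hy').2
        unfold Fm
        rw [List.filter_cons_of_neg (by simp only [beq_iff_eq]; omega)]

theorem portA_canonical (g : List (List Int)) (hg : g ≠ []) :
    adj_listify_target g =
      (PySem.List.dedup ((PySem.List.sorted g kf false).map kf)).map
        (Fm (PySem.List.sorted g kf false)) := by
  obtain ⟨r0, t, hs⟩ := List.exists_cons_of_ne_nil
    (fun hnil => hg ((PySem.List.sorted_eq_nil_iff g kf false).mp hnil))
  have h0 : adj_listify_target g =
      (let c0 := kf (PySem.List.pyGetD (PySem.List.sorted g kf false) 0 []);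
       let st := (PySem.List.enumerate (PySem.List.sorted g kf false) 0).foldl
         (fun st ir => stepA st ir.2) ([], [[c0]], c0);
       st.1 ++ [st.2.1]) := rfl
  rw [h0]
  simp only []
  rw [foldl_enum_snd, foldA_runs, hs]
  simp only [PySem.List.pyGetD_zero_cons, List.nil_append]
  rw [runs_spec (r0 :: t) (kf r0) [[kf r0]]
      (by have hh := PySem.List.sorted_map_key_pairwise g kf; rw [hs] at hh; exact hh)
      (by
        intro r hr
        refine PySem.List.key_head_sorted_le g kf hs r ?_
        exact (PySem.List.mem_sorted g kf false r).mp (by rw [hs]; exact hr))]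
  have e3 : PySem.List.dedup ((r0 :: t).map kf)
      = kf r0 :: (PySem.List.dedup (t.map kf)).filter (fun y => !(y == kf r0)) := by
    rw [List.map_cons, dedup_cons]
  have e4 : (kf r0 :: (PySem.List.dedup (t.map kf)).filter (fun y => !(y == kf r0))).filter
        (fun y => !(y == kf r0))
      = (PySem.List.dedup (t.map kf)).filter (fun y => !(y == kf r0)) := by
    rw [List.filter_cons_of_neg (by simp), List.filter_filter]
    exact List.filter_congr (fun y _ => by simp)
  rw [e3, e4, List.map_cons]
  rfl

theorem portB_canonical (g : List (List Int)) :
    adj_listify_target_alt g =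
      (PySem.List.sorted (PySem.List.dedup (g.map kf)) (fun h => h) false).map (Fm g) := by
  have hb : (g.foldl
      (fun (d : PySem.Dict Int (List (List Int))) row =>
        d.modify (PySem.List.pyGetD row 1 0) []
          (fun x => x ++ [[PySem.List.pyGetD row 0 0, PySem.List.pyGetD row 2 0]]))
      PySem.Dict.empty)
      = (g.map (fun r => (kf r, ef r))).foldl
          (fun d p => d.modify p.1 [] (fun x => x ++ [p.2])) PySem.Dict.empty := by
    rw [List.foldl_map]
    rfl
  have hkeys : (g.foldl
      (fun (d : PySem.Dict Int (List (List Int))) row =>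
        d.modify (PySem.List.pyGetD row 1 0) []
          (fun x => x ++ [[PySem.List.pyGetD row 0 0, PySem.List.pyGetD row 2 0]]))
      PySem.Dict.empty).keys = PySem.List.dedup (g.map kf) := by
    have hk := PySem.Dict.keys_foldl_modify_key (κ := Int) (ν := List (List Int)) g kf []
      (fun _ row => fun x => x ++ [ef row]) PySem.Dict.empty
    simpa [kf, ef, PySem.List.dedup, PySem.Set.update_nil_left] using hk
  unfold adj_listify_target_alt
  simp only []
  rw [hkeys]
  apply List.map_congr_left
  intro h _
  rw [hb, PySem.Dict.getD_foldl_modify_append]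
  simp [List.filter_map, List.map_map, Function.comp_def, Fm, kf, ef]

theorem keys_eq (g : List (List Int)) :
    PySem.List.dedup ((PySem.List.sorted g kf false).map kf)
      = PySem.List.sorted (PySem.List.dedup (g.map kf)) (fun h => h) false := by
  have hnd1 : (PySem.List.dedup ((PySem.List.sorted g kf false).map kf)).Nodup :=
    PySem.Set.nodup_ofList _
  have hnd2 : (PySem.List.dedup (g.map kf)).Nodup := PySem.Set.nodup_ofList _
  refine (PySem.List.sorted_eq_of_perm_of_pairwise_lt _ _ _ ?_ ?_).symm
  · rw [List.perm_ext_iff_of_nodup hnd1 hnd2]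
    intro a
    rw [PySem.List.mem_dedup, PySem.List.mem_dedup]
    constructor
    · intro ha
      obtain ⟨x, hx, rfl⟩ := List.mem_map.mp ha
      exact List.mem_map_of_mem ((PySem.List.mem_sorted g kf false x).mp hx)
    · intro ha
      obtain ⟨x, hx, rfl⟩ := List.mem_map.mp ha
      exact List.mem_map_of_mem ((PySem.List.mem_sorted g kf false x).mpr hx)
  · have hle : (PySem.List.dedup ((PySem.List.sorted g kf false).map kf)).Pairwise (· ≤ ·) :=
      List.Pairwise.sublist (dedup_sublist _) (PySem.List.sorted_map_key_pairwise g kf)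
    exact (hle.and hnd1).imp (fun hab => lt_of_le_of_ne hab.1 hab.2)

-- ===== VERDICT (by name: the statement is the Claim_ definition above) =====
theorem adj_listify_target_spec : Claim_equal_adj_listify_target := by
  intro g _ hpre
  unfold Spec_adj_listify_target
  rw [portA_canonical g hpre.1, portB_canonical g, keys_eq g]
  exact List.map_congr_left fun h _ => by
    unfold Fm; rw [sorted_filter_stable]
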